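-- pv_equiv track=rewrite | github.com/caringalhipe/cs199aclthesis | Algorithm/2/utils.py | generate_rooted_relations
-- ===== SOURCE A (Python) =====
-- def generate_rooted_relations(parent, vertices, relations):
--     if len(vertices) == 0:
--         return [sorted(relations)]
--     else:
--         rels = []
--         for child in vertices:
--             new_vertices = [v for v in vertices if v != child]
--             rels.extend(generate_rooted_relations(parent, new_vertices, relations + [(parent, child)]))
--             rels.extend(generate_rooted_relations(parent, new_vertices, relations + [(child, parent)]))
--             rels.extend(generate_rooted_relations(child, new_vertices, relations + [(parent, child)]))
--             rels.extend(generate_rooted_relations(child, new_vertices, relations + [(child, parent)]))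
--
--         true_rels = []
--         for rel in rels:
--             if rel not in true_rels:
--                 true_rels.append(rel)
--
--         return true_rels
-- ===== SOURCE B (Python) =====
-- def _raw_leaves(parent, vertices, relations):
--     # Pure enumeration: no per-level dedup, leaves in A's DFS preorder.
--     if not vertices:
--         return [sorted(relations)]
--     return [leaf
--             for child in vertices
--             for nxt_parent, rel in ((parent, (parent, child)),
--                                     (parent, (child, parent)),
--                                     (child, (parent, child)),
--                                     (child, (child, parent)))
--             for leaf in _raw_leaves(nxt_parent,
--                                     [v for v in vertices if v != child],
--                                     relations + [rel])]
--
--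
-- def generate_rooted_relations(parent, vertices, relations):
--     out = []
--     seen = set()
--     for leaf in _raw_leaves(parent, vertices, relations):
--         key = tuple(leaf)
--         if key not in seen:
--             seen.add(key)
--             out.append(leaf)
--     return out
-- ===== Notes on version B (the rewrite author's own statement) =====
-- stated objective: alternative
-- what changed: B splits the work into a pure recursive enumeration of leaves (no per-level dedup loop, a flat comprehension over the four successor kinds) followed by a single final first-occurrence dedup using a hash set, instead of A's quadratic not-in-list dedup repeated at every recursion node.
import Mathlib
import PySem

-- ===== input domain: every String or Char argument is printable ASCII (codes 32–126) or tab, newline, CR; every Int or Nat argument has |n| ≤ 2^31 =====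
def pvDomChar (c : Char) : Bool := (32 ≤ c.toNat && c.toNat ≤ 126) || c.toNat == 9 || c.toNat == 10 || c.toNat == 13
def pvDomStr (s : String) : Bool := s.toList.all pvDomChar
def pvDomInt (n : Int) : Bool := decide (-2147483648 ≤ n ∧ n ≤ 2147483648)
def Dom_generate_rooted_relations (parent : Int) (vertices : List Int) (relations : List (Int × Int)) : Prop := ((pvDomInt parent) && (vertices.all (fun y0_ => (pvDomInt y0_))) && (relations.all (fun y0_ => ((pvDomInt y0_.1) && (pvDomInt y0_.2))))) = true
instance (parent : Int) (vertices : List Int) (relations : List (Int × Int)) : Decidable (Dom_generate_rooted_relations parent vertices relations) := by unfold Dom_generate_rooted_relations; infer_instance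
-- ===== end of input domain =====

-- B replaces A's per-node not-in-list dedup by a pure leaf enumeration plus one final
-- hash-set first-occurrence dedup; return values proved equal on all inputs.

-- ===== PORT A =====
-- Literal port of A: recursive, extend four sub-results per child, then the not-in-list dedup pass.
def generate_rooted_relations (parent : Int) (vertices : List Int) (relations : List (Int × Int)) : List (List (Int × Int)) :=
  if vertices.length = 0 then
    [PySem.List.sorted2 relations (fun x => x.1) (fun x => x.2)]
  else
    let rels := vertices.attach.foldl (fun rels child =>
      let new_vertices := vertices.filter (fun v => v ≠ child.1)
      rels ++ generate_rooted_relations parent new_vertices (relations ++ [(parent, child.1)])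
           ++ generate_rooted_relations parent new_vertices (relations ++ [(child.1, parent)])
           ++ generate_rooted_relations child.1 new_vertices (relations ++ [(parent, child.1)])
           ++ generate_rooted_relations child.1 new_vertices (relations ++ [(child.1, parent)])) []
    rels.foldl (fun true_rels rel => if rel ∈ true_rels then true_rels else true_rels ++ [rel]) []
termination_by vertices.length
decreasing_by
  all_goals
    simp only [List.length_unattach]
    exact lt_of_lt_of_le
      (List.length_filter_lt_length_iff_exists.mpr ⟨child, List.mem_attach _ _, by simp⟩)
      (le_of_eq List.length_attach)

-- ===== PORT B =====
-- B's helper _raw_leaves: pure enumeration, no dedup, flat comprehension over the four successor kinds.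
def pvRawLeaves (parent : Int) (vertices : List Int) (relations : List (Int × Int)) : List (List (Int × Int)) :=
  if vertices.length = 0 then
    [PySem.List.sorted2 relations (fun x => x.1) (fun x => x.2)]
  else
    vertices.attach.flatMap (fun child =>
      [(parent, (parent, child.1)), (parent, (child.1, parent)),
       (child.1, (parent, child.1)), (child.1, (child.1, parent))].flatMap (fun pr =>
        pvRawLeaves pr.1 (vertices.filter (fun v => v ≠ child.1)) (relations ++ [pr.2])))
termination_by vertices.length
decreasing_by
  all_goals
    simp only [List.length_unattach]
    exact lt_of_lt_of_le
      (List.length_filter_lt_length_iff_exists.mpr ⟨child, List.mem_attach _ _, by simp⟩)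
      (le_of_eq List.length_attach)

-- B's main body: one pass over the leaves with a seen-set, appending unseen leaves.
def generate_rooted_relations_alt (parent : Int) (vertices : List Int) (relations : List (Int × Int)) : List (List (Int × Int)) :=
  ((pvRawLeaves parent vertices relations).foldl
    (fun (st : List (List (Int × Int)) × PySem.Set (List (Int × Int))) leaf =>
      if PySem.Set.contains st.2 leaf then st else (st.1 ++ [leaf], PySem.Set.add st.2 leaf))
    ([], PySem.Set.empty)).1

-- ===== PRECONDITION & SPEC =====
def Spec_generate_rooted_relations (parent : Int) (vertices : List Int) (relations : List (Int × Int)) (out : List (List (Int × Int))) : Prop := out = generate_rooted_relations_alt parent vertices relations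
instance (parent : Int) (vertices : List Int) (relations : List (Int × Int)) (out : List (List (Int × Int))) : Decidable (Spec_generate_rooted_relations parent vertices relations out) := by unfold Spec_generate_rooted_relations; infer_instance

-- ===== CLAIM (what is proved, stated in full; the proofs are below) =====
def Claim_equal_generate_rooted_relations : Prop := ∀ (parent : Int) (vertices : List Int) (relations : List (Int × Int)), Dom_generate_rooted_relations parent vertices relations → Spec_generate_rooted_relations parent vertices relations (generate_rooted_relations parent vertices relations)

-- ===== LEMMAS AND PROOFS =====

-- First-occurrence dedup as A's foldl loop, with an accumulator.
def pvDdl {α : Type} [DecidableEq α] (acc : List α) (l : List α) : List α :=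
  l.foldl (fun tr x => if x ∈ tr then tr else tr ++ [x]) acc

def pvFo {α : Type} [DecidableEq α] (l : List α) : List α :=
  match l with
  | [] => []
  | x :: xs => x :: pvFo (xs.filter (fun y => y ≠ x))
termination_by l.length
decreasing_by
  simp only [List.length_unattach]
  exact lt_of_lt_of_le (Nat.lt_succ_of_le (List.length_filter_le _ _))
    (by simp [List.length_attach])

theorem pvFo_cons {α : Type} [DecidableEq α] (x : α) (xs : List α) :
    pvFo (x :: xs) = x :: pvFo (xs.filter (fun y => y ≠ x)) := by
  rw [pvFo]

theorem pvDdl_append {α : Type} [DecidableEq α] (acc : List α) (l₁ l₂ : List α) :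
    pvDdl acc (l₁ ++ l₂) = pvDdl (pvDdl acc l₁) l₂ := by
  simp [pvDdl, List.foldl_append]

theorem pvDdl_char {α : Type} [DecidableEq α] (l : List α) : ∀ acc : List α,
    pvDdl acc l = acc ++ pvFo (l.filter (fun x => x ∉ acc)) := by
  induction l with
  | nil => intro acc; simp [pvDdl, pvFo]
  | cons x xs ih =>
    intro acc
    by_cases hx : x ∈ acc
    · have h0 : pvDdl acc (x :: xs) = pvDdl acc xs := by simp [pvDdl, hx]
      rw [h0, ih, List.filter_cons]
      simp [hx]
    · have h1 : pvDdl acc (x :: xs) = pvDdl (acc ++ [x]) xs := by simp [pvDdl, hx]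
      rw [h1, ih, List.filter_cons]
      have hfil : (xs.filter (fun y => y ∉ acc ++ [x]))
          = (xs.filter (fun y => y ∉ acc)).filter (fun y => y ≠ x) := by
        rw [List.filter_filter]
        apply List.filter_congr
        intro y _
        by_cases hyx : y = x <;> by_cases hya : y ∈ acc <;> simp [hyx, hya]
      simp [hx, pvFo_cons]
      congr 1
      apply List.filter_congr
      intro y _
      cases h1 : decide (y = x) <;> cases h2 : decide (y ∈ acc) <;> simp_all

theorem pvFo_filter {α : Type} [DecidableEq α] : ∀ (n : Nat) (l : List α), l.length ≤ n →
    ∀ p : α → Bool, pvFo (l.filter p) = (pvFo l).filter p := by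
  intro n
  induction n with
  | zero =>
    intro l hl p
    have : l = [] := List.eq_nil_of_length_eq_zero (Nat.le_zero.mp hl)
    subst this; simp [pvFo]
  | succ n ih =>
    intro l hl p
    match l with
    | [] => simp [pvFo]
    | x :: xs =>
      have hxs : (xs.filter (fun y => y ≠ x)).length ≤ n := by
        have := List.length_filter_le (fun y => decide (y ≠ x)) xs
        simp at hl
        omega
      by_cases hpx : p x
      · rw [List.filter_cons]
        simp only [hpx, if_pos]
        have hcomm : (xs.filter p).filter (fun y => y ≠ x) = (xs.filter (fun y => y ≠ x)).filter p := by
          rw [List.filter_filter, List.filter_filter]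
          apply List.filter_congr
          intro y _
          cases h1 : p y <;> cases h2 : decide (y ≠ x) <;> simp_all

        rw [pvFo_cons x xs, pvFo_cons x (xs.filter p), List.filter_cons]
        simp only [hpx, if_pos]
        rw [hcomm, ih _ hxs p]
      · rw [List.filter_cons]
        simp only [hpx, Bool.false_eq_true, if_neg, not_false_iff]
        rw [pvFo_cons, List.filter_cons]
        simp only [hpx, Bool.false_eq_true, if_neg, not_false_iff]
        rw [← ih _ hxs p]
        congr 1
        rw [List.filter_filter]
        apply List.filter_congr
        intro y _
        by_cases hyx : y = x
        · subst hyx; simp [hpx]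
        · simp [hyx]

theorem pvFo_idem {α : Type} [DecidableEq α] : ∀ (n : Nat) (l : List α), l.length ≤ n →
    pvFo (pvFo l) = pvFo l := by
  intro n
  induction n with
  | zero =>
    intro l hl
    have : l = [] := List.eq_nil_of_length_eq_zero (Nat.le_zero.mp hl)
    subst this; simp [pvFo]
  | succ n ih =>
    intro l hl
    match l with
    | [] => simp [pvFo]
    | x :: xs =>
      have hxs : (xs.filter (fun y => y ≠ x)).length ≤ n := by
        have := List.length_filter_le (fun y => decide (y ≠ x)) xs
        simp at hl
        omega
      rw [pvFo_cons, pvFo_cons]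
      have h1 : (pvFo (xs.filter (fun y => y ≠ x))).filter (fun y => y ≠ x)
          = pvFo ((xs.filter (fun y => y ≠ x)).filter (fun y => y ≠ x)) := by
        rw [pvFo_filter _ _ hxs]
      have h2 : (xs.filter (fun y => y ≠ x)).filter (fun y => y ≠ x) = xs.filter (fun y => y ≠ x) := by
        apply List.filter_eq_self.mpr
        intro y hy
        exact (List.mem_filter.mp hy).2
      rw [h1, h2, ih _ hxs]

theorem pvDdl_nil_eq_fo {α : Type} [DecidableEq α] (l : List α) : pvDdl [] l = pvFo l := by
  rw [pvDdl_char]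
  simp

theorem pvDdl_ddl {α : Type} [DecidableEq α] (acc l : List α) :
    pvDdl acc (pvDdl [] l) = pvDdl acc l := by
  rw [pvDdl_nil_eq_fo, pvDdl_char, pvDdl_char l acc]
  rw [← pvFo_filter l.length l le_rfl]
  rw [pvFo_idem l.length _ (List.length_filter_le _ _)]

-- A's per-child block of four deduped sub-results collapses to the raw block under the outer dedup.
theorem pvDdl_blocks {α β : Type} [DecidableEq β]
    (cs : List α) (D1 D2 D3 D4 R1 R2 R3 R4 : α → List β)
    (h : ∀ c ∈ cs, D1 c = pvDdl [] (R1 c) ∧ D2 c = pvDdl [] (R2 c) ∧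
                   D3 c = pvDdl [] (R3 c) ∧ D4 c = pvDdl [] (R4 c)) :
    ∀ acc : List β,
    pvDdl acc (cs.flatMap (fun c => D1 c ++ (D2 c ++ (D3 c ++ D4 c))))
      = pvDdl acc (cs.flatMap (fun c => R1 c ++ (R2 c ++ (R3 c ++ R4 c)))) := by
  induction cs with
  | nil => intro acc; simp
  | cons c cs ih =>
    intro acc
    obtain ⟨h1, h2, h3, h4⟩ := h c (List.mem_cons_self)
    simp only [List.flatMap_cons, List.append_assoc, pvDdl_append]
    rw [h1, h2, h3, h4, pvDdl_ddl, pvDdl_ddl, pvDdl_ddl, pvDdl_ddl]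
    exact ih (fun c hc => h c (List.mem_cons_of_mem _ hc)) _

-- A's foldl of appended blocks is a flatMap.
theorem pvFoldl_blocks {α β : Type} (cs : List α) (f : α → List β) :
    ∀ init : List β, cs.foldl (fun a c => a ++ f c) init = init ++ cs.flatMap f := by
  induction cs with
  | nil => intro init; simp
  | cons c cs ih => intro init; simp [ih]

-- A computes the first-occurrence dedup of B's raw leaf stream.
theorem pvA_eq_ddl_raw : ∀ (n : Nat) (vs : List Int), vs.length ≤ n → ∀ (p : Int) (r : List (Int × Int)),
    generate_rooted_relations p vs r = pvDdl [] (pvRawLeaves p vs r) := by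
  intro n
  induction n with
  | zero =>
    intro vs hvs p r
    have : vs = [] := List.eq_nil_of_length_eq_zero (Nat.le_zero.mp hvs)
    subst this
    rw [generate_rooted_relations, pvRawLeaves]
    simp [pvDdl]
  | succ n ih =>
    intro vs hvs p r
    by_cases hlen : vs.length = 0
    · have : vs = [] := List.eq_nil_of_length_eq_zero hlen
      subst this
      rw [generate_rooted_relations, pvRawLeaves]
      simp [pvDdl]
    · rw [generate_rooted_relations, pvRawLeaves]
      simp only [hlen, if_false]
      have hsub : ∀ (c : Int), c ∈ vs → (vs.filter (fun v => v ≠ c)).length ≤ n := by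
        intro c hc
        have : (vs.filter (fun v => v ≠ c)).length < vs.length :=
          List.length_filter_lt_length_iff_exists.mpr ⟨c, hc, by simp⟩
        omega
      simp only [List.append_assoc]
      rw [show (List.foldl (fun rels child =>
            rels ++ (generate_rooted_relations p (vs.filter (fun v => v ≠ child.1)) (r ++ [(p, child.1)])
              ++ (generate_rooted_relations p (vs.filter (fun v => v ≠ child.1)) (r ++ [(child.1, p)])
              ++ (generate_rooted_relations child.1 (vs.filter (fun v => v ≠ child.1)) (r ++ [(p, child.1)])
              ++ generate_rooted_relations child.1 (vs.filter (fun v => v ≠ child.1)) (r ++ [(child.1, p)])))))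
            [] vs.attach)
          = vs.attach.flatMap (fun child =>
              generate_rooted_relations p (vs.filter (fun v => v ≠ child.1)) (r ++ [(p, child.1)])
              ++ (generate_rooted_relations p (vs.filter (fun v => v ≠ child.1)) (r ++ [(child.1, p)])
              ++ (generate_rooted_relations child.1 (vs.filter (fun v => v ≠ child.1)) (r ++ [(p, child.1)])
              ++ generate_rooted_relations child.1 (vs.filter (fun v => v ≠ child.1)) (r ++ [(child.1, p)]))))
        from by rw [pvFoldl_blocks]; simp]
      have hflat : (vs.attach.flatMap (fun child =>
          [(p, (p, child.1)), (p, (child.1, p)), (child.1, (p, child.1)), (child.1, (child.1, p))].flatMap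
            (fun pr => pvRawLeaves pr.1 (vs.filter (fun v => v ≠ child.1)) (r ++ [pr.2]))))
          = vs.attach.flatMap (fun child =>
              pvRawLeaves p (vs.filter (fun v => v ≠ child.1)) (r ++ [(p, child.1)])
            ++ (pvRawLeaves p (vs.filter (fun v => v ≠ child.1)) (r ++ [(child.1, p)])
            ++ (pvRawLeaves child.1 (vs.filter (fun v => v ≠ child.1)) (r ++ [(p, child.1)])
            ++ pvRawLeaves child.1 (vs.filter (fun v => v ≠ child.1)) (r ++ [(child.1, p)])))) := by
        apply List.flatMap_congr ?_
        intro child _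
        simp [List.flatMap_cons]
      rw [hflat]
      have hddl : ∀ (l : List (List (Int × Int))),
          List.foldl (fun true_rels rel => if rel ∈ true_rels then true_rels else true_rels ++ [rel]) [] l
            = pvDdl [] l := fun l => by
        unfold pvDdl; congr 1; funext tr x; by_cases h : x ∈ tr <;> simp [h]
      rw [hddl]
      apply pvDdl_blocks
      intro child _
      have hc := hsub child.1 child.2
      exact ⟨ih _ hc p _, ih _ hc p _, ih _ hc child.1 _, ih _ hc child.1 _⟩

-- B's seen-set pass is the same first-occurrence dedup.
theorem pvSeen_fold {α : Type} [DecidableEq α] [BEq α] [LawfulBEq α] (leaves : List α) :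
    ∀ (out seen : List α), (∀ x, x ∈ seen ↔ x ∈ out) →
    (leaves.foldl (fun (st : List α × PySem.Set α) leaf =>
        if PySem.Set.contains st.2 leaf then st else (st.1 ++ [leaf], PySem.Set.add st.2 leaf))
      (out, seen)).1 = pvDdl out leaves := by
  induction leaves with
  | nil => intro out seen _; simp [pvDdl]
  | cons leaf rest ih =>
    intro out seen hinv
    by_cases hmem : leaf ∈ out
    · have hc : PySem.Set.contains seen leaf = true := by
        simp [PySem.Set.contains, (hinv leaf).mpr hmem]
      simp only [List.foldl_cons, hc, if_pos]
      rw [ih out seen hinv]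
      simp [pvDdl, hmem]
    · have hc : PySem.Set.contains seen leaf = false := by
        simp only [PySem.Set.contains, List.contains_eq_mem, decide_eq_false_iff_not]
        exact fun h => hmem ((hinv leaf).mp h)
      simp only [List.foldl_cons, hc, if_neg, Bool.false_eq_true, not_false_iff]
      rw [ih (out ++ [leaf]) (PySem.Set.add seen leaf) ?_]
      · simp [pvDdl, hmem]
      · intro x
        have : x ∈ PySem.Set.add seen leaf ↔ x ∈ seen ∨ x = leaf := by
          simp [PySem.Set.mem_add]
        rw [this]
        simp only [List.mem_append, List.mem_singleton]
        constructor
        · rintro (h | h)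
          · exact Or.inl ((hinv x).mp h)
          · exact Or.inr h
        · rintro (h | h)
          · exact Or.inl ((hinv x).mpr h)
          · exact Or.inr h

-- ===== VERDICT (by name: the statement is the Claim_ definition above) =====
theorem generate_rooted_relations_spec : Claim_equal_generate_rooted_relations := by
  intro parent vertices relations _
  unfold Spec_generate_rooted_relations generate_rooted_relations_alt
  rw [pvSeen_fold _ [] PySem.Set.empty (by simp [PySem.Set.empty])]
  exact pvA_eq_ddl_raw vertices.length vertices le_rfl parent relations
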